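-- pv_equiv track=rewrite | github.com/Garvit244/Leetcode | 100-200q/162.py | findPeakElement
-- ===== SOURCE A (Python) =====
-- def findPeakElement(nums):
--     """
--     :type nums: List[int]
--     :rtype: int
--     """
--     left = [False]*len(nums)
--     right = [False]*len(nums)
--     left[0], right[len(nums)-1] = True, True
--
--     for index in range(1, len(nums)):
--         if nums[index] > nums[index-1]:
--             left[index] = True
--
--     for index in range(len(nums)-2, -1, -1):
--         if nums[index] > nums[index+1]:
--             right[index] = True
--
--     for index in range(len(left)):
--         if left[index] and right[index]:
--             return index
--     return -1
-- ===== SOURCE B (Python) =====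
-- def findPeakElement(nums):
--     n = len(nums)
--     for i in range(n):
--         if (i == 0 or nums[i] > nums[i-1]) and (i == n-1 or nums[i] > nums[i+1]):
--             return i
--     return -1
-- ===== Notes on version B (the rewrite author's own statement) =====
-- stated objective: simpler
-- what changed: Replaced the two boolean tables and three passes with a single forward scan that checks the peak predicate (i==0 or nums[i]>nums[i-1]) and (i==n-1 or nums[i]>nums[i+1]) directly and returns the first matching index, else -1; it allocates no tables and exits early at the first peak.
import Mathlib
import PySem

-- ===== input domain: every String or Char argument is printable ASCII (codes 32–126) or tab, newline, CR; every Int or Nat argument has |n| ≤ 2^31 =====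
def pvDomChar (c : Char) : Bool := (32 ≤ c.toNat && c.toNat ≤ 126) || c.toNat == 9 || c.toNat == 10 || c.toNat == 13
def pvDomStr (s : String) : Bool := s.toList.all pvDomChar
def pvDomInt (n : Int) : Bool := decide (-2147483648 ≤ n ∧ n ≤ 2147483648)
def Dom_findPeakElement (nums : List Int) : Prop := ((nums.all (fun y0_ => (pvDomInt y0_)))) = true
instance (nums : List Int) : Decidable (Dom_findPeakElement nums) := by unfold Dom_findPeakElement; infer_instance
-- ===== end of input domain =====

-- B replaces A's two boolean tables and three passes by one forward scan of the
-- direct peak predicate (simpler, O(1) extra space); A raises IndexError on the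
-- empty list, which Pre_ excludes (B simply returns -1 there).


-- ===== PORT A =====
-- nums[i] for an index known to be in range (all loop indices below are):
-- exact for 0 ≤ i < len nums, which every use satisfies.
def pvIdx (nums : List Int) (i : Nat) : Int := (PySem.List.pyGet? nums (i : Int)).getD 0

-- 'for index in range(len(left)): if left[index] and right[index]: return index / return -1'
def pvScanA (left right : List Bool) (i : Nat) : Int :=
  if i < left.length then
    if left.getD i false && right.getD i false then (i : Int) else pvScanA left right (i + 1)
  else -1
termination_by left.length - i

def findPeakElement (nums : List Int) : Int :=
  let n := nums.length
  -- left = [False]*n; right = [False]*n; left[0], right[n-1] = True, True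
  let left0 := (List.replicate n false).set 0 true
  let right0 := (List.replicate n false).set (n - 1) true
  -- for index in range(1, n): …   (range(1, n) = List.range' 1 (n-1))
  let left := (List.range' 1 (n - 1)).foldl
    (fun L i => if pvIdx nums i > pvIdx nums (i - 1) then L.set i true else L) left0
  -- for index in range(n-2, -1, -1): …   (= the reverse of range(0, n-1))
  let right := ((List.range (n - 1)).reverse).foldl
    (fun L i => if pvIdx nums i > pvIdx nums (i + 1) then L.set i true else L) right0
  pvScanA left right 0

-- ===== PORT B =====
def pvPeakB (nums : List Int) (n i : Nat) : Bool :=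
  (decide (i = 0) || decide (pvIdx nums i > pvIdx nums (i - 1))) &&
  (decide (i = n - 1) || decide (pvIdx nums i > pvIdx nums (i + 1)))

def pvScanB (nums : List Int) (i : Nat) : Int :=
  if i < nums.length then
    if pvPeakB nums nums.length i then (i : Int) else pvScanB nums (i + 1)
  else -1
termination_by nums.length - i

def findPeakElement_alt (nums : List Int) : Int := pvScanB nums 0

-- ===== PRECONDITION & SPEC =====
-- A raises IndexError on the empty list (left[0] on an empty table); excluded here.
def Pre_findPeakElement (nums : List Int) : Prop := nums ≠ []
instance (nums : List Int) : Decidable (Pre_findPeakElement nums) := by unfold Pre_findPeakElement; infer_instance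
def pvWitness_findPeakElement : List Int := [1, 2, 1]

def Spec_findPeakElement (nums : List Int) (out : Int) : Prop := out = findPeakElement_alt nums
instance (nums : List Int) (out : Int) : Decidable (Spec_findPeakElement nums out) := by unfold Spec_findPeakElement; infer_instance

-- ===== CLAIM (what is proved, stated in full; the proofs are below) =====
def Claim_equal_findPeakElement : Prop := ∀ (nums : List Int), Dom_findPeakElement nums → Pre_findPeakElement nums → Spec_findPeakElement nums (findPeakElement nums)

-- ===== LEMMAS AND PROOFS =====

theorem pv_foldl_set_length (c : Nat → Prop) [DecidablePred c] (is : List Nat) (L0 : List Bool) :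
    (is.foldl (fun L i => if c i then L.set i true else L) L0).length = L0.length := by
  induction is generalizing L0 with
  | nil => rfl
  | cons i is ih =>
      simp only [List.foldl_cons]
      rw [ih]
      split <;> simp

theorem pv_foldl_set_getD (c : Nat → Prop) [DecidablePred c] (is : List Nat) (L0 : List Bool) (j : Nat) :
    ((is.foldl (fun L i => if c i then L.set i true else L) L0).getD j false) =
      if j ∈ is ∧ c j ∧ j < L0.length then true else L0.getD j false := by
  induction is generalizing L0 with
  | nil => simp
  | cons i is ih =>
      simp only [List.foldl_cons]
      rw [ih]
      by_cases hci : c i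
      · simp only [hci, if_true, List.length_set]
        by_cases hij : j = i
        · subst hij
          by_cases hlen : j < L0.length
          · simp [hlen, hci, List.getD, List.mem_cons]
          · simp [hlen, hci, List.getD, List.set_eq_of_length_le (Nat.le_of_not_lt hlen),
              List.mem_cons]
        · have hget : (L0.set i true).getD j false = L0.getD j false := by
            simp [List.getD, List.getElem?_set_ne (fun h => hij h.symm)]
          simp only [List.mem_cons, hij, false_or, hget]
      · have hcj : ∀ (p : Prop), (j ∈ i :: is ∧ c j ∧ p) ↔ (j ∈ is ∧ c j ∧ p) := by
          intro p
          constructor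
          · rintro ⟨hm, hc, hp⟩
            rcases List.mem_cons.mp hm with h | h
            · exact absurd (h ▸ hc) hci
            · exact ⟨h, hc, hp⟩
          · rintro ⟨hm, hc, hp⟩
            exact ⟨List.mem_cons_of_mem _ hm, hc, hp⟩
        simp only [hci, hcj]
        simp

theorem pv_left_getD (nums : List Int) (j : Nat) (hj : j < nums.length) :
    ((List.range' 1 (nums.length - 1)).foldl
        (fun L i => if pvIdx nums i > pvIdx nums (i - 1) then L.set i true else L)
        ((List.replicate nums.length false).set 0 true)).getD j false
      = (decide (j = 0) || decide (pvIdx nums j > pvIdx nums (j - 1))) := by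
  rw [pv_foldl_set_getD]
  have hmem : j ∈ List.range' 1 (nums.length - 1) ↔ 1 ≤ j ∧ j < nums.length := by
    rw [List.mem_range'_1]
    omega
  by_cases hj0 : j = 0
  · subst hj0
    have h1 : ¬ (1 ≤ (0:Nat)) := by omega
    simp [hmem, h1, List.getD, hj]
  · by_cases hc : pvIdx nums j > pvIdx nums (j - 1)
    · simp [hmem, hc, hj0, Nat.one_le_iff_ne_zero.mpr hj0, hj]
    · have hget : ((List.replicate nums.length false).set 0 true)[j]?.getD false = false := by
        simp [hj]
        rw [List.getElem_set_ne (by omega)]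
        simp
      simp [hc, hj0, hget, List.getD]

theorem pv_right_getD (nums : List Int) (j : Nat) (hj : j < nums.length) :
    (((List.range (nums.length - 1)).reverse).foldl
        (fun L i => if pvIdx nums i > pvIdx nums (i + 1) then L.set i true else L)
        ((List.replicate nums.length false).set (nums.length - 1) true)).getD j false
      = (decide (j = nums.length - 1) || decide (pvIdx nums j > pvIdx nums (j + 1))) := by
  rw [pv_foldl_set_getD]
  have hmem : j ∈ (List.range (nums.length - 1)).reverse ↔ j < nums.length - 1 := by
    rw [List.mem_reverse, List.mem_range]
  by_cases hj0 : j = nums.length - 1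
  · have hnm : ¬ (j < nums.length - 1) := by omega
    subst hj0
    have hjl : nums.length - 1 < ((List.replicate nums.length false)).length := by
      simp; omega
    simp only [hmem, hnm, if_false, List.getD, false_and]
    rw [List.getElem?_set_self']
    simp only [List.length_replicate] at hjl ⊢
    simp [hjl]
  · by_cases hc : pvIdx nums j > pvIdx nums (j + 1)
    · have hlt : j < nums.length - 1 := by omega
      simp [hmem, hlt, hc, hj0, hj]
    · have hget : ((List.replicate nums.length false).set (nums.length - 1) true)[j]?.getD false
          = false := by
        simp [hj]
        rw [List.getElem_set_ne (by omega)]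
        simp
      simp [hc, hj0, hget, List.getD]

theorem pv_scan_eq (nums : List Int) (left right : List Bool)
    (hl : left.length = nums.length)
    (hpt : ∀ j, j < nums.length →
      (left.getD j false && right.getD j false) = pvPeakB nums nums.length j) :
    ∀ k, pvScanA left right k = pvScanB nums k := by
  have H : ∀ m k, nums.length ≤ k + m → pvScanA left right k = pvScanB nums k := by
    intro m
    induction m with
    | zero =>
        intro k hk
        rw [pvScanA, pvScanB, hl]
        simp [Nat.not_lt.mpr (by omega : nums.length ≤ k)]
    | succ m ih =>
        intro k hk
        rw [pvScanA, pvScanB, hl]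
        by_cases hlt : k < nums.length
        · simp only [hlt, if_true]
          rw [hpt k hlt]
          split
          · rfl
          · exact ih (k + 1) (by omega)
        · simp [hlt]
  intro k
  exact H nums.length k (by omega)

-- ===== VERDICT (by name: the statements are the Claim_ definitions above) =====
theorem findPeakElement_spec : Claim_equal_findPeakElement := by
  intro nums _ _
  unfold Spec_findPeakElement findPeakElement findPeakElement_alt
  dsimp only
  apply pv_scan_eq
  · rw [pv_foldl_set_length]
    simp
  · intro j hj
    rw [pv_left_getD nums j hj, pv_right_getD nums j hj]
    rfl
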